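-- pv_equiv track=rewrite | github.com/typemytype/drawbot | ufo2svg/kerning.py | _compressKerningPhase1
-- ===== SOURCE A (Python) =====
-- def _compressKerningPhase1(kerning):
--     """
--     >>> kerning = {
--     ...     ("A", "A") : 100,
--     ...     ("A", "Aacute") : 100,
--     ...     ("Aacute", "A") : 100,
--     ...     ("A", "Agrave") : 200,
--     ...     ("Agrave", "A") : 200,
--     ...     ("A", "Adieresis") : 300,
--     ... }
--     >>> expected = {
--     ...     ("A", 100) : set(["A", "Aacute"]),
--     ...     ("Aacute", 100) : set(["A"]),
--     ...     ("A", 200) : set(["Agrave"]),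
--     ...     ("Agrave", 200) : set(["A"]),
--     ...     ("A", 300) : set(["Adieresis"]),
--     ... }
--     >>> result = _compressKerningPhase1(kerning)
--     >>> result == expected
--     True
--     """
--     # create a dict of form {(glyph1, value) : set(glyph2s)}
--     compressed = {}
--     for (glyph1, glyph2), value in kerning.items():
--         k = (glyph1, value)
--         if k not in compressed:
--             compressed[k] = set()
--         compressed[k].add(glyph2)
--     return compressed
-- ===== SOURCE B (Python) =====
-- def _compressKerningPhase1(kerning):
--     # grouped pass: dedup the (glyph1, value) keys once, then build each
--     # glyph2 set with one comprehension over the items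
--     keys = dict.fromkeys((glyph1, value) for (glyph1, glyph2), value in kerning.items())
--     return {
--         (glyph1, value): {g2 for (g1, g2), w in kerning.items() if g1 == glyph1 and w == value}
--         for (glyph1, value) in keys
--     }
-- ===== Notes on version B (the rewrite author's own statement) =====
-- stated objective: alternative
-- what changed: Replaces A's single-pass membership-guarded dict-of-sets accumulation with a grouped two-phase pass: dedup the (glyph1, value) keys once with dict.fromkeys, then build each glyph2 set by one comprehension over the items.
import Mathlib
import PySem

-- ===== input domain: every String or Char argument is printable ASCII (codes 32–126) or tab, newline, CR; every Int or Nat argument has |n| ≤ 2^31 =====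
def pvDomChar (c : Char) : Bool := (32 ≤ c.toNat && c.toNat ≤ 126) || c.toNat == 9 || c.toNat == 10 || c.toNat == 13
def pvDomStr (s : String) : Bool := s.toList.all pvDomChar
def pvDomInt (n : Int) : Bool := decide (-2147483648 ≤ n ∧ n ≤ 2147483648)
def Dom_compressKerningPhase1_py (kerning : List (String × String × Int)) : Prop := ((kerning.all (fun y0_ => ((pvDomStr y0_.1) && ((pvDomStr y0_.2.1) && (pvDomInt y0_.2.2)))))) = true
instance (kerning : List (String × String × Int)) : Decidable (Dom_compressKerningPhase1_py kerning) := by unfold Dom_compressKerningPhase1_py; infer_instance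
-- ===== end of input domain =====

-- B re-groups kerning by (glyph1, value) in two phases — dedup the keys, then one
-- comprehension per key — instead of A's membership-guarded dict-of-sets accumulation;
-- alternative decomposition, not faster (O(n*k) vs O(n)).

-- ===== PORT A =====
-- ===== PORT A =====
-- A: one pass, membership-guarded dict-of-sets accumulation
def pvStepA (comp : PySem.Dict (String × Int) (PySem.Set String))
    (p : String × String × Int) : PySem.Dict (String × Int) (PySem.Set String) :=
  let k : String × Int := (p.1, p.2.2)
  let comp2 := if comp.contains k then comp else comp.insert k PySem.Set.empty
  comp2.modify k PySem.Set.empty (fun s => PySem.Set.add s p.2.1)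

def compressKerningPhase1_py (kerning : List (String × String × Int)) : List (String × Int × List String) :=
  ((kerning.foldl pvStepA PySem.Dict.empty).items).map (fun q => (q.1.1, q.1.2, q.2))

-- ===== PORT B =====
-- {h2 for (h1, h2), w in kerning.items() if h1 == glyph1 and w == value}
def pvCollect (kerning : List (String × String × Int)) (k : String × Int) : PySem.Set String :=
  PySem.Set.ofList (kerning.filterMap
    (fun q => if q.1 = k.1 ∧ q.2.2 = k.2 then some q.2.1 else none))

def compressKerningPhase1_py_alt (kerning : List (String × String × Int)) : List (String × Int × List String) :=
  (PySem.List.dedup (kerning.map (fun p => (p.1, p.2.2)))).map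
    (fun k => (k.1, k.2, pvCollect kerning k))

-- ===== PRECONDITION & SPEC =====
def Spec_compressKerningPhase1_py (kerning : List (String × String × Int)) (out : List (String × Int × List String)) : Prop := out = compressKerningPhase1_py_alt kerning
instance (kerning : List (String × String × Int)) (out : List (String × Int × List String)) : Decidable (Spec_compressKerningPhase1_py kerning out) := by unfold Spec_compressKerningPhase1_py; infer_instance

-- ===== CLAIM (what is proved, stated in full; the proofs are below) =====
def Claim_equal_compressKerningPhase1_py : Prop := ∀ (kerning : List (String × String × Int)), Dom_compressKerningPhase1_py kerning → Spec_compressKerningPhase1_py kerning (compressKerningPhase1_py kerning)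

-- ===== LEMMAS AND PROOFS =====

lemma pvOfList_append_singleton {α : Type} [BEq α] (xs : List α) (x : α) :
    PySem.Set.ofList (xs ++ [x]) = PySem.Set.add (PySem.Set.ofList xs) x := by
  simp [PySem.Set.ofList_eq_foldl, List.foldl_append]

lemma pvCollect_append_ne (l : List (String × String × Int)) (e : String × String × Int)
    (k : String × Int) (h : k ≠ (e.1, e.2.2)) :
    pvCollect (l ++ [e]) k = pvCollect l k := by
  unfold pvCollect
  rw [List.filterMap_append]
  have : (if e.1 = k.1 ∧ e.2.2 = k.2 then some e.2.1 else none) = none := by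
    rw [if_neg]; rintro ⟨h1, h2⟩; exact h (Prod.ext h1.symm h2.symm)
  simp [this]

lemma pvCollect_append_self (l : List (String × String × Int)) (e : String × String × Int) :
    pvCollect (l ++ [e]) (e.1, e.2.2) = PySem.Set.add (pvCollect l (e.1, e.2.2)) e.2.1 := by
  unfold pvCollect
  rw [List.filterMap_append]
  simp [pvOfList_append_singleton]

lemma pvCollect_of_not_mem (l : List (String × String × Int)) (k : String × Int)
    (h : k ∉ l.map (fun p => (p.1, p.2.2))) : pvCollect l k = PySem.Set.empty := by
  unfold pvCollect
  have : l.filterMap (fun q => if q.1 = k.1 ∧ q.2.2 = k.2 then some q.2.1 else none) = [] := by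
    rw [List.filterMap_eq_nil_iff]
    intro q hq
    rw [if_neg]
    rintro ⟨h1, h2⟩
    exact h (List.mem_map.mpr ⟨q, hq, Prod.ext h1 h2⟩)
  simp [this, PySem.Set.empty, PySem.Set.ofList_eq_foldl]

lemma pvItems_fold (l : List (String × String × Int)) :
    (l.foldl pvStepA PySem.Dict.empty).items
      = (PySem.List.dedup (l.map (fun p => (p.1, p.2.2)))).map (fun k => (k, pvCollect l k)) := by
  induction l using List.reverseRecOn with
  | nil => rfl
  | append_singleton l e ih =>
    set k0 : String × Int := (e.1, e.2.2) with hk0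
    set D := l.foldl pvStepA PySem.Dict.empty with hD
    set K := PySem.List.dedup (l.map (fun p => (p.1, p.2.2))) with hK
    have hkeys : D.keys = K := by
      simp [PySem.Dict.keys, ih, List.map_map, Function.comp_def]
    have hnd : D.keys.Nodup := by rw [hkeys]; exact PySem.List.nodup_dedup _
    have hmodify : ∀ (d : PySem.Dict (String × Int) (PySem.Set String)) k f,
        d.modify k PySem.Set.empty f = d.insert k (f (d.getD k PySem.Set.empty)) := fun _ _ _ => rfl
    have hrhs : PySem.List.dedup ((l ++ [e]).map (fun p => (p.1, p.2.2)))
        = PySem.Set.add K k0 := by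
      rw [List.map_append, PySem.List.dedup_eq_ofList]
      simp only [List.map_cons, List.map_nil]
      rw [pvOfList_append_singleton, ← PySem.List.dedup_eq_ofList]
    rw [List.foldl_append, List.foldl_cons, List.foldl_nil, hrhs, ← hD]
    show ((if D.contains k0 then D else D.insert k0 PySem.Set.empty).modify k0
        PySem.Set.empty (fun s => PySem.Set.add s e.2.1)).items
      = (PySem.Set.add K k0).map (fun k => (k, pvCollect (l ++ [e]) k))
    rw [PySem.Dict.contains_eq_decide_mem_keys, hkeys]
    have hcont : D.contains k0 = decide (k0 ∈ K) := by
      rw [PySem.Dict.contains_eq_decide_mem_keys, hkeys]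
    by_cases hm : k0 ∈ K
    · rw [if_pos (by simp [hm])]
      rw [hmodify, PySem.Dict.items_insert_of_contains _ _ (by rw [hcont]; simp [hm])]
      have hget : D.getD k0 PySem.Set.empty = pvCollect l k0 :=
        PySem.Dict.getD_of_mem_items _ (by rw [ih]; exact List.mem_map.mpr ⟨k0, hm, rfl⟩) hnd _
      rw [hget, ih, List.map_map, PySem.Set.add_of_mem hm]
      apply List.map_congr_left
      intro k hk
      by_cases hkk : k = k0
      · subst hkk
        simp only [Function.comp_def, beq_self_eq_true, if_pos]
        rw [hk0, pvCollect_append_self l e]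
      · simp only [Function.comp_def]
        rw [if_neg (by simp [hkk]), pvCollect_append_ne l e k hkk]
    · rw [if_neg (by simp [hm])]
      rw [hmodify, PySem.Dict.getD_insert_self, PySem.Dict.insert_insert_self,
        PySem.Dict.items_insert_of_not_contains _ _ (by rw [hcont]; simp [hm]),
        ih, PySem.Set.add_of_not_mem hm, List.map_append]
      have hnotin : k0 ∉ l.map (fun p => (p.1, p.2.2)) := by
        intro h
        exact hm (by rw [hK, PySem.List.dedup_eq_ofList]; exact (PySem.Set.mem_ofList _ _).mpr h)
      congr 1
      · apply List.map_congr_left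
        intro k hk
        rw [pvCollect_append_ne l e k (by rintro rfl; exact hm hk)]
      · simp only [List.map_cons, List.map_nil]
        rw [hk0, pvCollect_append_self l e, pvCollect_of_not_mem l k0 hnotin]

-- ===== VERDICT (by name: the statement is the Claim_ definition above) =====
theorem compressKerningPhase1_py_spec : Claim_equal_compressKerningPhase1_py := by
  intro kerning _
  unfold Spec_compressKerningPhase1_py compressKerningPhase1_py compressKerningPhase1_py_alt
  rw [pvItems_fold, List.map_map]
  rfl
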